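-- pv_equiv track=rewrite | github.com/mfocuz/coding-challs | AoC/2023/day3_gear_ratios.py | look_left
-- ===== SOURCE A (Python) =====
-- def look_left(engine, y, x, number_piece):
--     if 0 <= y <= len(engine)-1 and x >= 0:
--         if (engine[y][x]).isdigit():
--             number_piece = engine[y][x] + number_piece
--             return look_left(engine, y, x-1, number_piece)
--         else:
--             return number_piece
--     else:
--         return number_piece
-- ===== SOURCE B (Python) =====
-- def look_left(engine, y, x, number_piece):
--     # Slice-based rewrite: take the prefix of the row up to x, reverse it,
--     # measure its leading run of digits, and glue that run back in one concat.
--     if not (0 <= y < len(engine)):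
--         return number_piece
--     rev = engine[y][:max(x + 1, 0)][::-1]
--     i = 0
--     while i < len(rev) and rev[i].isdigit():
--         i += 1
--     return rev[:i][::-1] + number_piece
-- ===== Notes on version B (the rewrite author's own statement) =====
-- stated objective: alternative
-- what changed: Replaces the per-index tail recursion (guard and indexing re-done each call, string prepended each step) by slicing the row's prefix up to x, reversing it, counting its leading digit run, and assembling the result with a single concatenation.
import Mathlib
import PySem

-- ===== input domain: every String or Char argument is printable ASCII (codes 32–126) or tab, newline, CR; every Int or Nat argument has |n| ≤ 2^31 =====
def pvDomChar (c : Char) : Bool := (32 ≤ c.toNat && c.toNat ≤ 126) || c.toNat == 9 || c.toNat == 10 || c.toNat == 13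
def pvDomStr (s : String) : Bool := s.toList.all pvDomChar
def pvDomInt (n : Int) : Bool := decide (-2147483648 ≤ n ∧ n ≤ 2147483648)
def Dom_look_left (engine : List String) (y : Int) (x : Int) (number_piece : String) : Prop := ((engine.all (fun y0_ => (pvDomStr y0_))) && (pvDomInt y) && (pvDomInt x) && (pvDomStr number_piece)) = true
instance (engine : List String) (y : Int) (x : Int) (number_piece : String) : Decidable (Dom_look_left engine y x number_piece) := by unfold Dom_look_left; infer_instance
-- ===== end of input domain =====

-- B replaces A's per-index tail recursion by slicing the row's prefix up to x,
-- reversing it, counting its leading digit run and gluing with one concat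
-- (alternative decomposition); return values proved equal on Pre_.

-- ===== PORT A =====
-- A's tail recursion over x (the y-guard is invariant, so it is hoisted; the 0 ≤ x
-- part of the guard and the engine[y][x] access are re-done each call, as in A).
def lookLeftRecA (row : List Char) (x : Int) (acc : List Char) : List Char :=
  if _h : 0 ≤ x then
    match PySem.List.pyGet? row x with
    | none => acc            -- Python raises IndexError here; excluded by Pre_
    | some c =>
      if PySem.Chars.isdigit c then lookLeftRecA row (x - 1) (c :: acc) else acc
  else acc
termination_by (x + 1).toNat
decreasing_by omega

def look_left (engine : List String) (y : Int) (x : Int) (number_piece : String) : String :=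
  if 0 ≤ y ∧ y ≤ (engine.length : Int) - 1 ∧ 0 ≤ x then
    match PySem.List.pyGet? engine y with
    | none => number_piece   -- unreachable: the guard puts y in range
    | some row => String.ofList (lookLeftRecA row.toList x number_piece.toList)
  else number_piece

-- ===== PORT B =====
-- B's i-counting while-loop over `rev`: i stops at the first non-digit.
def countDigitsB (rev : List Char) : Nat :=
  match rev with
  | [] => 0
  | c :: rest => if PySem.Chars.isdigit c then countDigitsB rest + 1 else 0

def look_left_alt (engine : List String) (y : Int) (x : Int) (number_piece : String) : String :=
  if 0 ≤ y ∧ y < (engine.length : Int) then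
    match PySem.List.pyGet? engine y with
    | none => number_piece   -- unreachable: y is in range
    | some row =>
      -- rev = engine[y][:max(x+1, 0)][::-1]
      let rev := (PySem.List.slice row.toList none (some (max (x + 1) 0))).reverse
      let i := countDigitsB rev
      -- rev[:i][::-1] + number_piece
      String.ofList ((rev.take i).reverse ++ number_piece.toList)
  else number_piece

-- ===== PRECONDITION & SPEC =====
-- Pre_ excludes exactly the inputs where Python A raises IndexError: y in range,
-- 0 ≤ x, but x is not a valid index of row engine[y].
def Pre_look_left (engine : List String) (y : Int) (x : Int) (number_piece : String) : Prop :=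
  (0 ≤ y ∧ y ≤ (engine.length : Int) - 1 ∧ 0 ≤ x) →
    x < ((engine.getD y.toNat "").toList.length : Int)
instance (engine : List String) (y : Int) (x : Int) (number_piece : String) : Decidable (Pre_look_left engine y x number_piece) := by unfold Pre_look_left; infer_instance
def pvWitness_look_left : List String × Int × Int × String := (["12a"], 0, 1, "5")

def Spec_look_left (engine : List String) (y : Int) (x : Int) (number_piece : String) (out : String) : Prop := out = look_left_alt engine y x number_piece
instance (engine : List String) (y : Int) (x : Int) (number_piece : String) (out : String) : Decidable (Spec_look_left engine y x number_piece out) := by unfold Spec_look_left; infer_instance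

-- ===== CLAIM =====
def Claim_equal_look_left : Prop := ∀ (engine : List String) (y : Int) (x : Int) (number_piece : String), Dom_look_left engine y x number_piece → Pre_look_left engine y x number_piece → Spec_look_left engine y x number_piece (look_left engine y x number_piece)

-- ===== LEMMAS AND PROOFS =====

-- B's counted prefix is the leading digit run.
theorem take_countDigitsB (l : List Char) :
    l.take (countDigitsB l) = l.takeWhile (fun c => PySem.Chars.isdigit c) := by
  induction l with
  | nil => rfl
  | cons c rest ih =>
    by_cases h : PySem.Chars.isdigit c <;> simp [countDigitsB, List.takeWhile, h, ih]

-- A's recursion computes the reversed leading digit run of the reversed prefix.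
theorem lookLeftRecA_eq (row : List Char) (n : Nat) (acc : List Char) (hn : n < row.length) :
    lookLeftRecA row (n : Int) acc =
      ((row.take (n + 1)).reverse.takeWhile (fun c => PySem.Chars.isdigit c)).reverse ++ acc := by
  induction n generalizing acc with
  | zero =>
    rw [lookLeftRecA, dif_pos (by positivity)]
    have hget : PySem.List.pyGet? row ((0 : Nat) : Int) = some row[0] := by
      rw [PySem.List.pyGet?_natCast, List.getElem?_eq_getElem hn]
    have h1 : row.take (0 + 1) = [row[0]] := by
      rw [List.take_add_one, List.take_zero, List.getElem?_eq_getElem hn]; rfl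
    by_cases hd : PySem.Chars.isdigit row[0]
    · simp only [hget]
      rw [if_pos hd, lookLeftRecA, dif_neg (by omega)]
      simp [h1, hd]
    · simp only [hget]
      rw [if_neg hd]
      simp [h1, hd]
  | succ m ih =>
    rw [lookLeftRecA, dif_pos (by positivity)]
    have hget : PySem.List.pyGet? row ((m + 1 : Nat) : Int) = some row[m + 1] := by
      rw [PySem.List.pyGet?_natCast, List.getElem?_eq_getElem hn]
    have hsp : (row.take (m + 1 + 1)).reverse = row[m + 1] :: (row.take (m + 1)).reverse := by
      rw [List.take_add_one (i := m + 1), List.getElem?_eq_getElem hn]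
      simp
    by_cases hd : PySem.Chars.isdigit row[m + 1]
    · simp only [hget]
      rw [if_pos hd]
      have hc : ((m + 1 : Nat) : Int) - 1 = ((m : Nat) : Int) := by push_cast; ring
      rw [hc, ih (row[m + 1] :: acc) (by omega), hsp]
      simp [List.takeWhile, hd]
    · simp only [hget]
      rw [if_neg hd, hsp]
      simp [List.takeWhile, hd]

-- ===== VERDICT =====
theorem look_left_spec : Claim_equal_look_left := by
  intro engine y x number_piece _hdom hpre
  unfold Spec_look_left look_left look_left_alt
  by_cases hy : 0 ≤ y ∧ y < (engine.length : Int)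
  · by_cases hx : 0 ≤ x
    · have hA : 0 ≤ y ∧ y ≤ (engine.length : Int) - 1 ∧ 0 ≤ x := ⟨hy.1, by omega, hx⟩
      rw [if_pos hA, if_pos hy]
      cases hget : PySem.List.pyGet? engine y with
      | none => rfl
      | some row =>
        dsimp only
        have hyN : y = ((y.toNat : Nat) : Int) := by omega
        have hlt : y.toNat < engine.length := by omega
        have hrowElem : row = engine[y.toNat] := by
          rw [hyN, PySem.List.pyGet?_natCast, List.getElem?_eq_getElem hlt] at hget
          exact (Option.some.inj hget).symm
        have hxlen : x < (row.toList.length : Int) := by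
          have := hpre hA
          rw [hrowElem]
          simpa [List.getD, List.getElem?_eq_getElem hlt] using this
        have hmax : max (x + 1) 0 = x + 1 := by omega
        have htn : (x + 1).toNat = x.toNat + 1 := by omega
        have hslice : PySem.List.slice row.toList none (some (max (x + 1) 0)) =
            row.toList.take (x.toNat + 1) := by
          rw [hmax, PySem.List.slice_to _ (by omega), htn]
        have hxN : x = ((x.toNat : Nat) : Int) := by omega
        rw [hslice, take_countDigitsB, hxN,
          lookLeftRecA_eq row.toList x.toNat number_piece.toList (by omega)]
        simp
        rw [show (max x 0).toNat = x.toNat from by omega]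
    · rw [if_neg (by omega), if_pos hy]
      cases hget : PySem.List.pyGet? engine y with
      | none => rfl
      | some row =>
        dsimp only
        have hmax : max (x + 1) 0 = 0 := by omega
        rw [hmax, PySem.List.slice_to _ (by omega)]
        simp [countDigitsB]
  · rw [if_neg (by omega), if_neg hy]
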